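-- pv_equiv track=rewrite | github.com/ashe-hahaha/my_leetcode | 15.三数之和.py | ifnotin
-- ===== SOURCE A (Python) =====
-- def ifnotin(reslist,target):
--     flag = 1
--     for rec in reslist:
--         if (target[0] in rec) and (target[1] in rec) and (target[2] in rec) and target!=[0,0,0]:
--             return False
--         if rec == [0,0,0]:
--             flag = 0
--     if target == [0,0,0] and flag == 0:
--         return False
--     return True
-- ===== SOURCE B (Python) =====
-- def ifnotin(reslist, target):
--     zero = target == [0, 0, 0]
--     tset = set(target[:3])
--
--     def dup(rec):
--         if zero:
--             return rec == [0, 0, 0]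
--         return tset.issubset(rec)
--
--     def go(rest):
--         if not rest:
--             return True
--         return (not dup(rest[0])) and go(rest[1:])
--
--     return go(reslist)
-- ===== Notes on version B (the rewrite author's own statement) =====
-- stated objective: alternative
-- what changed: Replaced the flag-carrying loop with early return by a recursive scan over list suffixes applying a single duplicate predicate, which tests set(target[:3]).issubset(rec) instead of three separate membership tests and handles the [0,0,0] case by an equality predicate chosen up front instead of an end-of-loop flag check.
import Mathlib
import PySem

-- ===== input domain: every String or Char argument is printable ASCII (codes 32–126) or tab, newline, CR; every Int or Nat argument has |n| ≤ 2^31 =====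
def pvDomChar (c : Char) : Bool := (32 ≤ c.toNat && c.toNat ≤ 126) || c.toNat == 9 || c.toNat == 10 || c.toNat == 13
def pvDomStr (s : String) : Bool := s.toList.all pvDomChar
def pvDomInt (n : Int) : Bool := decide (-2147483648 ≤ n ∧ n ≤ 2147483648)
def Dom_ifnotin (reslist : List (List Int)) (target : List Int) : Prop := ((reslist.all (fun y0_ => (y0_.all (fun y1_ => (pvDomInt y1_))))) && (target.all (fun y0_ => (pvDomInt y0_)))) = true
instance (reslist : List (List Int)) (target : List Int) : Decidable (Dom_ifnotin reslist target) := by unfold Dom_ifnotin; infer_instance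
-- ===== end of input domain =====

-- B replaces A's flag-carrying loop by a recursive suffix scan with one duplicate
-- predicate (set-subset test, or equality with [0,0,0]) chosen up front (objective:
-- alternative); return values agree on Pre_.

-- ===== PORT A =====
-- `target[k] in rec` with a possibly out-of-range index: pyGet? returns none exactly
-- where Python raises IndexError (those inputs are excluded by Pre_ifnotin below).
def pyMemAt (target : List Int) (k : Int) (rec : List Int) : Bool :=
  (PySem.List.pyGet? target k).any (fun t => decide (t ∈ rec))

-- A's loop, carrying the `flag` state; early `return False` is the first branch.
def ifnotinLoop (target : List Int) (flag : Int) : List (List Int) → Bool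
  | [] => if target = [0, 0, 0] ∧ flag = 0 then false else true
  | rec :: rest =>
      if (pyMemAt target 0 rec && pyMemAt target 1 rec && pyMemAt target 2 rec)
          && !(decide (target = [0, 0, 0])) then false
      else ifnotinLoop target (if rec = [0, 0, 0] then 0 else flag) rest

def ifnotin (reslist : List (List Int)) (target : List Int) : Bool :=
  ifnotinLoop target 1 reslist

-- ===== PORT B =====
-- B's inner `go`: recursion over the suffixes of the result list.
def ifnotinGo (dup : List Int → Bool) : List (List Int) → Bool
  | [] => true
  | r :: rest => !(dup r) && ifnotinGo dup rest

def ifnotin_alt (reslist : List (List Int)) (target : List Int) : Bool :=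
  let zero := decide (target = [0, 0, 0])
  let tset : PySem.Set Int := PySem.Set.ofList (PySem.List.slice target none (some 3))
  ifnotinGo
    (fun rec => if zero then decide (rec = [0, 0, 0]) else PySem.Set.issubset tset rec)
    reslist

-- ===== PRECONDITION & SPEC =====
-- Pre_ excludes exactly the inputs where Python A raises IndexError (target shorter
-- than 3 and the scan reaches a missing target[k]).
def Pre_ifnotin (reslist : List (List Int)) (target : List Int) : Prop :=
  3 ≤ target.length ∨ reslist = [] ∨
    (target ≠ [] ∧ ∀ rec ∈ reslist, ∃ x ∈ target.take 2, x ∉ rec)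
instance (reslist : List (List Int)) (target : List Int) : Decidable (Pre_ifnotin reslist target) := by unfold Pre_ifnotin; infer_instance

def pvWitness_ifnotin : List (List Int) × List Int := ([[1, 2, 3], [0, 0, 0]], [1, 2, 4])

def Spec_ifnotin (reslist : List (List Int)) (target : List Int) (out : Bool) : Prop := out = ifnotin_alt reslist target
instance (reslist : List (List Int)) (target : List Int) (out : Bool) : Decidable (Spec_ifnotin reslist target out) := by unfold Spec_ifnotin; infer_instance

-- ===== CLAIM =====
def Claim_equal_ifnotin : Prop := ∀ (reslist : List (List Int)) (target : List Int), Dom_ifnotin reslist target → Pre_ifnotin reslist target → Spec_ifnotin reslist target (ifnotin reslist target)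

-- ===== LEMMAS AND PROOFS =====

-- With target = [0,0,0] the early-return branch never fires and `flag` records
-- whether [0,0,0] has been seen.
lemma loop_zero (l : List (List Int)) (flag : Int) :
    ifnotinLoop [0, 0, 0] flag l =
      if flag = 0 ∨ [0, 0, 0] ∈ l then false else true := by
  induction l generalizing flag with
  | nil => simp [ifnotinLoop]
  | cons rec rest ih =>
      simp only [ifnotinLoop]
      rw [ih]
      by_cases h : rec = [0, 0, 0] <;> by_cases hf : flag = 0 <;>
        simp [h, hf, List.mem_cons, eq_comm]

-- With target ≠ [0,0,0] the flag is irrelevant and the loop is a not-exists scan.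
lemma loop_ne (target : List Int) (h : target ≠ [0, 0, 0]) (l : List (List Int))
    (flag : Int) :
    ifnotinLoop target flag l =
      !(l.any (fun rec =>
          pyMemAt target 0 rec && pyMemAt target 1 rec && pyMemAt target 2 rec)) := by
  induction l generalizing flag with
  | nil => simp [ifnotinLoop, h]
  | cons rec rest ih =>
      simp only [ifnotinLoop, h, decide_false, Bool.not_false, Bool.and_true,
        List.any_cons]
      by_cases hm : (pyMemAt target 0 rec && pyMemAt target 1 rec
          && pyMemAt target 2 rec) = true
      · simp [hm]
      · simp only [Bool.not_eq_true] at hm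
        simp [hm, ih]

-- B's recursion is the complement of an any-scan.
lemma go_eq_not_any (dup : List Int → Bool) (l : List (List Int)) :
    ifnotinGo dup l = !(l.any dup) := by
  induction l with
  | nil => simp [ifnotinGo]
  | cons r rest ih => simp [ifnotinGo, ih]

-- set(l) <= set(rec) says every element of l is in rec.
lemma issubset_ofList_iff (l rec : List Int) :
    PySem.Set.issubset (PySem.Set.ofList l) rec = true ↔ ∀ x ∈ l, x ∈ rec := by
  simp [PySem.Set.issubset, List.all_eq_true, PySem.Set.mem_ofList]

-- The subset test agrees with A's three membership tests wherever A does not raise.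
lemma dup_eq_mem3 (target rec : List Int)
    (h : 3 ≤ target.length ∨ ∃ x ∈ target.take 2, x ∉ rec) :
    PySem.Set.issubset (PySem.Set.ofList (PySem.List.slice target none (some 3))) rec
      = (pyMemAt target 0 rec && pyMemAt target 1 rec && pyMemAt target 2 rec) := by
  rw [show ((3 : Int)) = ((3 : Nat) : Int) from rfl, PySem.List.slice_to_natCast]
  rw [Bool.eq_iff_iff, issubset_ofList_iff]
  rcases h with h3 | ⟨x, hx, hxn⟩
  · match target, h3 with
    | t0 :: t1 :: t2 :: ts, _ =>
      have g0 := PySem.List.pyGet?_ofNat (xs := t0 :: t1 :: t2 :: ts) (n := 0) (by simp)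
      have g1 := PySem.List.pyGet?_ofNat (xs := t0 :: t1 :: t2 :: ts) (n := 1) (by simp)
      have g2 := PySem.List.pyGet?_ofNat (xs := t0 :: t1 :: t2 :: ts) (n := 2) (by simp)
      simp only [Nat.cast_ofNat, Nat.cast_one, Nat.cast_zero] at g0 g1 g2
      simp [pyMemAt, g0, g1, g2, List.take]
      tauto
  · match target, hx with
    | [t0], hx =>
      simp only [List.take, List.mem_singleton] at hx
      simp [pyMemAt, List.take, hx ▸ hxn]
    | t0 :: t1 :: ts, hx =>
      have g0 := PySem.List.pyGet?_ofNat (xs := t0 :: t1 :: ts) (n := 0) (by simp)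
      have g1 := PySem.List.pyGet?_ofNat (xs := t0 :: t1 :: ts) (n := 1) (by simp)
      simp only [Nat.cast_one, Nat.cast_zero] at g0 g1
      simp only [List.take, List.mem_cons, List.not_mem_nil, or_false] at hx
      rcases hx with rfl | rfl
      · simp [pyMemAt, g0, List.take, hxn]
      · simp [pyMemAt, g0, List.take, hxn]

-- ===== VERDICT =====
theorem ifnotin_spec : Claim_equal_ifnotin := by
  intro reslist target _ hpre
  unfold Spec_ifnotin ifnotin ifnotin_alt
  by_cases hz : target = [0, 0, 0]
  · subst hz
    rw [loop_zero, go_eq_not_any]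
    simp only [decide_true, if_true]
    by_cases hm : [0, 0, 0] ∈ reslist
    · rw [if_pos (Or.inr hm)]
      have hany : (reslist.any fun rec => decide (rec = [0, 0, 0])) = true :=
        List.any_eq_true.mpr ⟨_, hm, by simp⟩
      simp [hany]
    · rw [if_neg (by simp [hm])]
      have hany : (reslist.any fun rec => decide (rec = [0, 0, 0])) = false := by
        rw [List.any_eq_false]
        intro r hr
        simp only [decide_eq_true_eq]
        rintro rfl
        exact hm hr
      simp [hany]
  · rw [loop_ne target hz, go_eq_not_any]
    have hcong : ∀ rec ∈ reslist,
        (PySem.Set.issubset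
          (PySem.Set.ofList (PySem.List.slice target none (some 3))) rec)
          = (pyMemAt target 0 rec && pyMemAt target 1 rec && pyMemAt target 2 rec) := by
      intro rec hr
      rcases hpre with h3 | hnil | ⟨_, hall⟩
      · exact dup_eq_mem3 target rec (Or.inl h3)
      · subst hnil; cases hr
      · exact dup_eq_mem3 target rec (Or.inr (hall rec hr))
    congr 1
    rw [Bool.eq_iff_iff]
    simp only [List.any_eq_true]
    constructor
    · rintro ⟨r, hr, h⟩
      refine ⟨r, hr, ?_⟩
      simp only [hz, decide_false, Bool.false_eq_true, if_false]
      rw [hcong r hr]; exact h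
    · rintro ⟨r, hr, h⟩
      refine ⟨r, hr, ?_⟩
      rw [← hcong r hr]
      simpa [hz] using h
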